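-- pv_equiv track=rewrite | github.com/vachan12/cdac_python_assignments | SLA2/SLA_q8.py | add_string_grouped
-- ===== SOURCE A (Python) =====
-- def add_string_grouped(new_string, current_list):
--     if not new_string or len(new_string) < 2:
--         return current_list
--
--     char_to_find = new_string[1]
--     insertion_index = -1
--
--     # Find the last occurrence of a string with the same 2nd character
--     for i, s in enumerate(current_list):
--         if len(s) >= 2 and s[1] == char_to_find:
--             insertion_index = i + 1
--
--     if insertion_index != -1:
--         current_list.insert(insertion_index, new_string)
--     else:
--         # If no match is found, just append to the end
--         current_list.append(new_string)
--
--     return current_list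
-- ===== SOURCE B (Python) =====
-- def add_string_grouped(new_string, current_list):
--     if not new_string or len(new_string) < 2:
--         return current_list
--
--     ch = new_string[1]
--     # Build the result back-to-front: walking the reversed list, the last match of
--     # the original list is the FIRST match seen, and new_string goes right before it.
--     out = []
--     placed = False
--     for s in reversed(current_list):
--         if not placed and len(s) >= 2 and s[1] == ch:
--             out.append(new_string)
--             placed = True
--         out.append(s)
--     out.reverse()
--     if not placed:
--         out.append(new_string)
--     current_list[:] = out
--     return current_list
-- ===== Notes on version B (the rewrite author's own statement) =====
-- stated objective: alternative
-- what changed: Instead of scanning for an index and calling list.insert, B rebuilds the output back-to-front over the reversed list with a placed flag (emitting new_string just before the first match seen from the back), then reverses, appending only if never placed.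
import Mathlib
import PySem

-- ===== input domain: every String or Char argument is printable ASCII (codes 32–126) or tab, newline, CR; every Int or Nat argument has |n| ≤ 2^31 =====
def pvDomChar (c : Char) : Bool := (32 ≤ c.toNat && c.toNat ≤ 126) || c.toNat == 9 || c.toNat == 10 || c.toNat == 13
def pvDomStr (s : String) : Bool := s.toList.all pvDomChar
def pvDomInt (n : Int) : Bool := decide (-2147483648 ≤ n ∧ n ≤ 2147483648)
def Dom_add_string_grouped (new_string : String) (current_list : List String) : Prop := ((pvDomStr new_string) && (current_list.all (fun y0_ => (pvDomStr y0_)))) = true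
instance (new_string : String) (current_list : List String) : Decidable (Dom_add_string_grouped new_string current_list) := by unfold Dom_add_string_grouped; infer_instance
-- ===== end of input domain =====

-- B rebuilds the output back-to-front over the reversed list with a placed flag instead of
-- computing an index and calling insert; same return value, same in-place mutation in Python.

-- ===== PORT A =====
-- len(s) >= 2 and s[1] == ch; getD is exact since it is guarded by the length test
def pvMatchA (ch : Char) (s : String) : Bool :=
  decide (2 ≤ s.toList.length) && (s.toList.getD 1 ' ' == ch)

def add_string_grouped (new_string : String) (current_list : List String) : List String :=
  if new_string.toList.length < 2 then current_list   -- 'not new_string or len(new_string) < 2'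
  else
    let char_to_find := new_string.toList.getD 1 ' '  -- new_string[1], exact: length ≥ 2 here
    let insertion_index : Int :=
      (PySem.List.enumerate current_list 0).foldl
        (fun acc p => if pvMatchA char_to_find p.2 then p.1 + 1 else acc) (-1)
    if insertion_index ≠ -1 then
      PySem.List.insert current_list insertion_index new_string
    else
      current_list ++ [new_string]

-- ===== PORT B =====
-- len(s) >= 2 and s[1] == ch; getD is exact since it is guarded by the length test
def pvMatchB (ch : Char) (s : String) : Bool :=
  decide (2 ≤ s.toList.length) && (s.toList.getD 1 ' ' == ch)

-- the loop body: 'if not placed and <match>: out.append(new); placed = True' then 'out.append(s)'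
def pvStepB (ch : Char) (new : String) (st : List String × Bool) (s : String) : List String × Bool :=
  let st := if !st.2 && pvMatchB ch s then (st.1 ++ [new], true) else st
  (st.1 ++ [s], st.2)

def add_string_grouped_alt (new_string : String) (current_list : List String) : List String :=
  if new_string.toList.length < 2 then current_list   -- 'not new_string or len(new_string) < 2'
  else
    let ch := new_string.toList.getD 1 ' '            -- new_string[1], exact: length ≥ 2 here
    let st := current_list.reverse.foldl (pvStepB ch new_string) ([], false)
    let out := st.1.reverse                           -- out.reverse()
    if !st.2 then out ++ [new_string] else out        -- if not placed: out.append(new_string)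

-- ===== PRECONDITION & SPEC =====
def Spec_add_string_grouped (new_string : String) (current_list : List String) (out : List String) : Prop := out = add_string_grouped_alt new_string current_list
instance (new_string : String) (current_list : List String) (out : List String) : Decidable (Spec_add_string_grouped new_string current_list out) := by unfold Spec_add_string_grouped; infer_instance

-- ===== CLAIM =====
def Claim_equal_add_string_grouped : Prop := ∀ (new_string : String) (current_list : List String), Dom_add_string_grouped new_string current_list → Spec_add_string_grouped new_string current_list (add_string_grouped new_string current_list)

-- ===== LEMMAS AND PROOFS =====

-- last index in l whose entry matches (proof-level characterisation both ports are reduced to)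
def pvLastMatch (ch : Char) : List String → Option Nat
  | [] => none
  | s :: rest =>
    match pvLastMatch ch rest with
    | some j => some (j + 1)
    | none => if pvMatchA ch s then some 0 else none

theorem pvMatchB_eq (ch : Char) (s : String) : pvMatchB ch s = pvMatchA ch s := rfl

theorem pvLastMatch_lt (ch : Char) (l : List String) (j : Nat)
    (h : pvLastMatch ch l = some j) : j < l.length := by
  induction l generalizing j with
  | nil => simp [pvLastMatch] at h
  | cons s rest ih =>
    simp only [pvLastMatch] at h
    rw [List.length_cons]
    cases hr : pvLastMatch ch rest with
    | some k =>
      rw [hr] at h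
      have := ih k hr
      simp at h
      omega
    | none =>
      rw [hr] at h
      by_cases hp : pvMatchA ch s = true <;> simp [hp] at h <;> omega

theorem pvLastMatch_append_singleton (ch : Char) (xs : List String) (x : String) :
    pvLastMatch ch (xs ++ [x]) =
      if pvMatchA ch x then some xs.length else pvLastMatch ch xs := by
  induction xs with
  | nil => simp [pvLastMatch]
  | cons s rest ih =>
    simp only [List.cons_append, pvLastMatch, ih]
    by_cases h : pvMatchA ch x = true <;> simp [h]

-- A's fold over enumerate with offset k computes k + (last match index) + 1, or the seed
theorem pvFoldA_char (ch : Char) (l : List String) (k acc : Int) :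
    (PySem.List.enumerate l k).foldl
        (fun a p => if pvMatchA ch p.2 then p.1 + 1 else a) acc =
      match pvLastMatch ch l with
      | some j => k + j + 1
      | none => acc := by
  induction l generalizing k acc with
  | nil => simp [PySem.List.enumerate_nil, pvLastMatch]
  | cons s rest ih =>
    rw [PySem.List.enumerate_cons]
    simp only [List.foldl_cons, pvLastMatch]
    rw [ih]
    cases h : pvLastMatch ch rest with
    | some j => simp; ring
    | none =>
      by_cases hp : pvMatchA ch s = true <;> simp [hp]

-- once placed, the loop body only copies elements through
theorem pvFoldB_placed (ch : Char) (new : String) (ys acc : List String) :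
    ys.foldl (pvStepB ch new) (acc, true) = (acc ++ ys, true) := by
  induction ys generalizing acc with
  | nil => simp
  | cons y ys ih => simp [pvStepB, ih]

-- B's fold over the reversed list: new lands just before the first match seen from the back,
-- which is exactly A's insert-after-the-last-match position
theorem pvFoldB_char (ch : Char) (new : String) (l : List String) : ∀ (acc : List String),
    l.reverse.foldl (pvStepB ch new) (acc, false) =
      match pvLastMatch ch l with
      | none => (acc ++ l.reverse, false)
      | some j => (acc ++ (PySem.List.insert l ((j : Int) + 1) new).reverse, true) := by
  induction l using List.reverseRecOn with
  | nil => intro acc; simp [pvLastMatch]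
  | append_singleton xs x ih =>
    intro acc
    rw [List.reverse_append, List.reverse_singleton, List.singleton_append, List.foldl_cons,
      pvLastMatch_append_singleton]
    by_cases hp : pvMatchA ch x = true
    · -- first (from the back) element matches: emit new then x, then copy the rest
      have hstep : pvStepB ch new (acc, false) x = (acc ++ [new] ++ [x], true) := by
        simp [pvStepB, pvMatchB_eq, hp]
      have hins : PySem.List.insert (xs ++ [x]) ((xs.length : Int) + 1) new
          = (xs ++ [x]) ++ [new] := by
        have h1 : ((xs.length : Int) + 1) = ((xs.length + 1 : Nat) : Int) := by push_cast; ring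
        rw [h1, PySem.List.insert_natCast _ _ _ (by simp),
          List.take_of_length_le (by simp), List.drop_of_length_le (by simp)]
      rw [hstep, pvFoldB_placed]
      simp [hp, hins]
    · -- does not match: copy x, recurse on xs with extended accumulator
      have hstep : pvStepB ch new (acc, false) x = (acc ++ [x], false) := by
        simp [pvStepB, pvMatchB_eq, hp]
      rw [hstep, ih (acc ++ [x])]
      cases hl : pvLastMatch ch xs with
      | none => simp [hp]
      | some j =>
        have hj : j < xs.length := pvLastMatch_lt ch xs j hl
        have hins : PySem.List.insert (xs ++ [x]) ((j : Int) + 1) new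
            = (PySem.List.insert xs ((j : Int) + 1) new) ++ [x] := by
          have h1 : ((j : Int) + 1) = ((j + 1 : Nat) : Int) := by push_cast; ring
          rw [h1, PySem.List.insert_natCast _ _ _ (by simp; omega),
            PySem.List.insert_natCast _ _ _ (by omega),
            List.take_append_of_le_length (by omega), List.drop_append_of_le_length (by omega)]
          simp
        simp [hp, hins]

-- ===== VERDICT =====
theorem add_string_grouped_spec : Claim_equal_add_string_grouped := by
  intro ns l _
  unfold Spec_add_string_grouped add_string_grouped add_string_grouped_alt
  dsimp only
  by_cases hlen : ns.toList.length < 2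
  · rw [if_pos hlen, if_pos hlen]
  · rw [if_neg hlen, if_neg hlen]
    rw [pvFoldA_char, pvFoldB_char]
    cases h : pvLastMatch (ns.toList.getD 1 ' ') l with
    | none => simp
    | some j =>
      have hne : (0 : Int) + (j : Int) + 1 ≠ -1 := by omega
      simp only [hne, ne_eq, not_false_eq_true, if_pos]
      norm_num
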